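-- pv_equiv track=rewrite | github.com/KotisKotlyandii/lessons1 | ege22/122.py | f
-- ===== SOURCE A (Python) =====
-- def f(n):
--     a = -1
--     while n > 7 and a != n % 8:
--         a = n % 8
--         n //= 8
--     if a == n % 8:
--         return a
--     else:
--         return n
-- ===== SOURCE B (Python) =====
-- def f(n):
--     if n <= 7:
--         return n
--     # build octal digits, least-significant first
--     digits = []
--     while n > 7:
--         digits.append(n % 8)
--         n //= 8
--     digits.append(n)
--     # scan for first adjacent equal pair from the low end
--     for i in range(len(digits) - 1):
--         if digits[i] == digits[i + 1]:
--             return digits[i]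
--     return digits[-1]
-- ===== Notes on version B (the rewrite author's own statement) =====
-- stated objective: simpler
-- what changed: A's fused extract-and-compare while loop with a sentinel previous-digit variable is split into a single-digit passthrough, a pass that materialises the octal digit list (least-significant first), and a separate scan returning the first adjacent equal digit or else the leading digit.
import Mathlib
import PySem

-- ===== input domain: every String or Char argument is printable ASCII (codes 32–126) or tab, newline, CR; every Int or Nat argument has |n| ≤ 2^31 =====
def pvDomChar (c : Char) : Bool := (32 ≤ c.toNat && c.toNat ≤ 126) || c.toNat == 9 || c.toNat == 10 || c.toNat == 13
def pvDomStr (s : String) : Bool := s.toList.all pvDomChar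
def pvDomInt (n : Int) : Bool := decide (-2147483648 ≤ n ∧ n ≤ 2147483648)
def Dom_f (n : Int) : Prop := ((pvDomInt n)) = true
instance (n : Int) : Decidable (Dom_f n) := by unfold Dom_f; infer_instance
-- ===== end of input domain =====

-- B replaces A's fused extract-and-compare while loop (with its sentinel previous digit) by a simpler
-- decomposition: materialise the octal digit list, then scan it for an adjacent equal pair.

-- ===== PORT A =====
-- A's while loop: state (n, a); compare the previous digit a with n % 8 before extracting.
def fA_loop (n a : Int) : Int :=
  if _h : n > 7 ∧ a ≠ PySem.Int.mod n 8 then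
    fA_loop (PySem.Int.floordiv n 8) (PySem.Int.mod n 8)
  else if a = PySem.Int.mod n 8 then a else n
termination_by n.toNat
decreasing_by
  rw [PySem.Int.floordiv_eq_ediv_of_pos (by norm_num : (0:Int) < 8)]
  omega

def f (n : Int) : Int := fA_loop n (-1)

-- ===== PORT B =====
-- pass 1 of Source B: the octal digits of n, least-significant first (final leading chunk appended last)
def digitsB (n : Int) : List Int :=
  if _h : n > 7 then PySem.Int.mod n 8 :: digitsB (PySem.Int.floordiv n 8)
  else [n]
termination_by n.toNat
decreasing_by
  rw [PySem.Int.floordiv_eq_ediv_of_pos (by norm_num : (0:Int) < 8)]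
  omega

-- pass 2 of Source B: forward scan, first digit whose right neighbour equals it, else the last digit
def scanB : List Int → Int
  | [] => 0
  | [d] => d
  | d :: e :: rest => if d = e then d else scanB (e :: rest)

def f_alt (n : Int) : Int := if n ≤ 7 then n else scanB (digitsB n)

-- ===== PRECONDITION & SPEC =====
def Spec_f (n : Int) (out : Int) : Prop := out = f_alt n
instance (n : Int) (out : Int) : Decidable (Spec_f n out) := by unfold Spec_f; infer_instance

-- ===== CLAIM (what is proved, stated in full; the proofs are below) =====
def Claim_equal_f : Prop := ∀ (n : Int), Dom_f n → Spec_f n (f n)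

-- ===== LEMMAS AND PROOFS =====

theorem mod8_bounds (n : Int) : 0 ≤ PySem.Int.mod n 8 ∧ PySem.Int.mod n 8 < 8 := by
  rw [PySem.Int.mod_eq_emod_of_pos (by norm_num : (0:Int) < 8)]
  omega

theorem digitsB_head (m : Int) (hm : 0 ≤ m) :
    ∃ t, digitsB m = PySem.Int.mod m 8 :: t := by
  rw [digitsB]
  by_cases h : m > 7
  · simp [h]
  · refine ⟨[], ?_⟩
    simp only [h, dite_false]
    rw [PySem.Int.mod_eq_emod_of_pos (by norm_num : (0:Int) < 8)]
    congr 1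
    omega

theorem fA_loop_eq (k : Nat) : ∀ (n a : Int), n.toNat ≤ k → 0 ≤ n →
    fA_loop n a = if a = PySem.Int.mod n 8 then a else scanB (digitsB n) := by
  induction k with
  | zero =>
    intro n a hk hn
    have hn7 : ¬ n > 7 := by omega
    rw [fA_loop, digitsB]
    simp only [hn7, false_and, dite_false]
    have : PySem.Int.mod n 8 = n := by
      rw [PySem.Int.mod_eq_emod_of_pos (by norm_num : (0:Int) < 8)]; omega
    rw [this]
    split <;> simp [scanB]
  | succ k ih =>
    intro n a hk hn
    by_cases h7 : n > 7
    · have hdiv : PySem.Int.floordiv n 8 = n / 8 :=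
        PySem.Int.floordiv_eq_ediv_of_pos (by norm_num)
      have hmlt : (PySem.Int.floordiv n 8).toNat ≤ k := by rw [hdiv]; omega
      have hm0 : 0 ≤ PySem.Int.floordiv n 8 := by rw [hdiv]; omega
      rw [digitsB]
      simp only [h7, dite_true]
      by_cases ha : a = PySem.Int.mod n 8
      · rw [fA_loop, dif_neg (fun h => h.2 ha), if_pos ha, if_pos ha]
      · obtain ⟨t, ht⟩ := digitsB_head (PySem.Int.floordiv n 8) hm0
        rw [fA_loop, dif_pos ⟨h7, ha⟩, ih _ _ hmlt hm0, if_neg ha, ht, scanB, ← ht]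
    · rw [fA_loop, digitsB]
      simp only [h7, false_and, dite_false]
      have : PySem.Int.mod n 8 = n := by
        rw [PySem.Int.mod_eq_emod_of_pos (by norm_num : (0:Int) < 8)]; omega
      rw [this]
      split <;> simp [scanB]

-- ===== VERDICT (by name: the statement is the Claim_ definition above) =====
theorem f_spec : Claim_equal_f := by
  intro n _
  unfold Spec_f f f_alt
  have hm := mod8_bounds n
  have hne : (-1 : Int) ≠ PySem.Int.mod n 8 := by omega
  by_cases h7 : n ≤ 7
  · rw [fA_loop]
    have hc : ¬(n > 7 ∧ (-1 : Int) ≠ PySem.Int.mod n 8) := by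
      intro h; omega
    rw [dif_neg hc, if_neg hne, if_pos h7]
  · have hn : 0 ≤ n := by omega
    rw [fA_loop_eq n.toNat n (-1) le_rfl hn, if_neg hne, if_neg h7]
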